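-- pv_equiv track=rewrite | github.com/Swixixle/Sweeps_Intel | src/intel/infra_denylist.py | is_noise_nameserver
-- ===== SOURCE A (Python) =====
-- NOISE_NAMESERVER_SUFFIXES: frozenset[str] = frozenset({
--     "cloudflare.com",
--     "googledomains.com",
--     "google.com",
--     "azure-dns.com",
--     "dnsimple.com",
--     "registrar-servers.com",
--     "domaincontrol.com",
--     "name-services.com",
-- })
--
-- NOISE_NAMESERVER_LABEL_PREFIXES: frozenset[str] = frozenset({
--     "awsdns-",
-- })
--
-- def _suffix_matches(host: str, suffix: str) -> bool:
--     return host == suffix or host.endswith("." + suffix)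
--
-- def is_noise_nameserver(ns: str) -> bool:
--     """Return True if this nameserver hostname matches any denylist entry."""
--     ns_lower = (ns or "").lower().strip().rstrip(".")
--     if not ns_lower:
--         return False
--     for suffix in NOISE_NAMESERVER_SUFFIXES:
--         if _suffix_matches(ns_lower, suffix):
--             return True
--     labels = ns_lower.split(".")
--     for label in labels:
--         for prefix in NOISE_NAMESERVER_LABEL_PREFIXES:
--             if label.startswith(prefix):
--                 return True
--     return False
-- ===== SOURCE B (Python) =====
-- NOISE_NAMESERVER_SUFFIXES: frozenset[str] = frozenset({
--     "cloudflare.com",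
--     "googledomains.com",
--     "google.com",
--     "azure-dns.com",
--     "dnsimple.com",
--     "registrar-servers.com",
--     "domaincontrol.com",
--     "name-services.com",
-- })
--
-- NOISE_NAMESERVER_LABEL_PREFIXES: frozenset[str] = frozenset({
--     "awsdns-",
-- })
--
--
-- def is_noise_nameserver(ns: str) -> bool:
--     """Return True if this nameserver hostname matches any denylist entry."""
--     host = (ns or "").lower().strip().rstrip(".")
--     if not host:
--         return False
--     labels = host.split(".")
--     # Enumerate the host's own label-aligned suffixes and look each one up
--     # in the denylist set, instead of scanning every denylist entry.
--     for i in range(len(labels)):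
--         if ".".join(labels[i:]) in NOISE_NAMESERVER_SUFFIXES:
--             return True
--     return any(label.startswith(prefix)
--                for label in labels
--                for prefix in NOISE_NAMESERVER_LABEL_PREFIXES)
-- ===== Notes on version B (the rewrite author's own statement) =====
-- stated objective: alternative
-- what changed: B inverts the suffix check: instead of scanning every denylist entry with endswith, it splits the host into labels once and enumerates the host's own label-aligned suffixes, looking each candidate up in the denylist set.
import Mathlib
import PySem

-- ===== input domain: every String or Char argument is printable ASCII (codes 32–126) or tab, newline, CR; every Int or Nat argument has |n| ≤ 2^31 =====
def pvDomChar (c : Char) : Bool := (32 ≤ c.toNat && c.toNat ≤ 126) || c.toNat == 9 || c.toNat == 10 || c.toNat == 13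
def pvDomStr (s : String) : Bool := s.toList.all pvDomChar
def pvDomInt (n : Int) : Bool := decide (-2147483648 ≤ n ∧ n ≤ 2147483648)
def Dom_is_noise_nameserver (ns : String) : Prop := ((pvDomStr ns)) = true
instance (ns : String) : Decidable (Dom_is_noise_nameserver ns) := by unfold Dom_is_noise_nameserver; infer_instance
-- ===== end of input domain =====

-- B replaces A's endswith-scan over every denylist entry by enumerating the host's
-- own label-aligned suffixes and looking each one up in the denylist (objective: alternative).

-- ===== PORT A =====
-- the frozensets are ported as the list of their elements: they are only ever used
-- for an order-independent boolean 'any' / membership, so iteration order is irrelevant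
def pvSuffixes : List (List Char) :=
  ["cloudflare.com".toList, "googledomains.com".toList, "google.com".toList,
   "azure-dns.com".toList, "dnsimple.com".toList, "registrar-servers.com".toList,
   "domaincontrol.com".toList, "name-services.com".toList]

def pvPrefixes : List (List Char) := ["awsdns-".toList]

-- (ns or "") is ns itself for strings; .rstrip(".") ported by hand (exact: drop '.'-chars
-- from the right), since PySem has no one-sided strip with an explicit char set
def pvNormalize (ns : String) : List Char :=
  ((PySem.Chars.strip (PySem.Chars.lower ns.toList)).reverse.dropWhile (· == '.')).reverse

def pvSuffixMatches (host suffix : List Char) : Bool :=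
  host == suffix || PySem.Chars.endswith host ('.' :: suffix)

def is_noise_nameserver (ns : String) : Bool :=
  let nsLower := pvNormalize ns
  if nsLower = [] then false
  else if pvSuffixes.any (fun suffix => pvSuffixMatches nsLower suffix) then true
  else
    let labels := PySem.Chars.splitOn nsLower ['.']
    labels.any (fun label => pvPrefixes.any (fun p => PySem.Chars.startswith label p))

-- ===== PORT B =====
def is_noise_nameserver_alt (ns : String) : Bool :=
  let host := pvNormalize ns
  if host = [] then false
  else
    let labels := PySem.Chars.splitOn host ['.']
    if (PySem.List.pyRange 0 labels.length 1).any (fun i =>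
         pvSuffixes.contains (PySem.Chars.join ['.'] (PySem.List.slice labels (some i) none)))
    then true
    else labels.any (fun label => pvPrefixes.any (fun p => PySem.Chars.startswith label p))

-- ===== PRECONDITION & SPEC =====
def Spec_is_noise_nameserver (ns : String) (out : Bool) : Prop := out = is_noise_nameserver_alt ns
instance (ns : String) (out : Bool) : Decidable (Spec_is_noise_nameserver ns out) := by unfold Spec_is_noise_nameserver; infer_instance

-- ===== CLAIM (what is proved, stated in full; the proofs are below) =====
def Claim_equal_is_noise_nameserver : Prop := ∀ (ns : String), Dom_is_noise_nameserver ns → Spec_is_noise_nameserver ns (is_noise_nameserver ns)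

-- ===== LEMMAS AND PROOFS =====

-- reference splitter used only by the proofs
def pvPieces : List Char → List (List Char)
  | [] => [[]]
  | c :: rest => if c = '.' then [] :: pvPieces rest else (pvPieces rest).modifyHead (c :: ·)

theorem pvPieces_cons_dot (rest : List Char) : pvPieces ('.' :: rest) = [] :: pvPieces rest := by
  simp [pvPieces]

theorem pvPieces_cons_ne (c : Char) (rest : List Char) (hc : ¬ c = '.') :
    pvPieces (c :: rest) = (pvPieces rest).modifyHead (c :: ·) := by
  simp [pvPieces, hc]

theorem pvPieces_ne_nil (cs : List Char) : pvPieces cs ≠ [] := by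
  induction cs with
  | nil => simp [pvPieces]
  | cons c rest ih =>
    by_cases hc : c = '.'
    · subst hc; simp [pvPieces_cons_dot]
    · rw [pvPieces_cons_ne c rest hc]
      cases h : pvPieces rest with
      | nil => exact absurd h ih
      | cons y t => simp [List.modifyHead]

theorem pvPieces_join (cs : List Char) : PySem.Chars.join ['.'] (pvPieces cs) = cs := by
  induction cs with
  | nil => simp [pvPieces, PySem.Chars.join_singleton]
  | cons c rest ih =>
    by_cases hc : c = '.'
    · subst hc
      rw [pvPieces_cons_dot]
      cases h : pvPieces rest with
      | nil => exact absurd h (pvPieces_ne_nil rest)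
      | cons y t =>
        rw [h] at ih
        rw [PySem.Chars.join_cons_cons]
        simp [ih]
    · rw [pvPieces_cons_ne c rest hc]
      cases h : pvPieces rest with
      | nil => exact absurd h (pvPieces_ne_nil rest)
      | cons y t =>
        rw [h] at ih
        cases t with
        | nil =>
          simp only [PySem.Chars.join_singleton] at ih
          simp [List.modifyHead, PySem.Chars.join_singleton, ih]
        | cons z t' =>
          rw [PySem.Chars.join_cons_cons] at ih
          simp only [List.modifyHead]
          rw [PySem.Chars.join_cons_cons]
          simp [ih]

theorem pvPieces_dotfree (cs : List Char) : ∀ x ∈ pvPieces cs, '.' ∉ x := by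
  induction cs with
  | nil => simp [pvPieces]
  | cons c rest ih =>
    by_cases hc : c = '.'
    · subst hc; rw [pvPieces_cons_dot]; simpa using ih
    · rw [pvPieces_cons_ne c rest hc]
      cases h : pvPieces rest with
      | nil => exact absurd h (pvPieces_ne_nil rest)
      | cons y t =>
        rw [h] at ih
        intro x hx
        simp only [List.modifyHead, List.mem_cons] at hx
        rcases hx with rfl | hx
        · intro hmem
          rcases List.mem_cons.mp hmem with h1 | h2
          · exact hc h1.symm
          · exact ih y (by simp) h2
        · exact ih x (by simp [hx])

theorem pv_go_eq (fuel : Nat) : ∀ (l cur _acc : List Char) (acc' : List (List Char)),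
    l.length < fuel →
    PySem.Chars.splitOn.go ['.'] fuel l cur acc' =
      acc'.reverse ++ (pvPieces l).modifyHead (cur.reverse ++ ·) := by
  induction fuel with
  | zero => intro l cur acc acc' h; omega
  | succ f ih =>
    intro l cur _ acc' h
    cases l with
    | nil =>
      simp [PySem.Chars.splitOn.go, pvPieces, List.modifyHead]
    | cons c rest =>
      simp only [PySem.Chars.splitOn.go]
      by_cases hc : c = '.'
      · subst hc
        have hpre : List.isPrefixOf ['.'] ('.' :: rest) = true := by simp [List.isPrefixOf]
        rw [if_pos hpre]
        have hdrop : List.drop (['.'] : List Char).length ('.' :: rest) = rest := rfl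
        rw [hdrop]
        simp only [List.length_cons] at h
        rw [ih rest [] [] (cur.reverse :: acc') (by omega)]
        cases hp : pvPieces rest with
        | nil => exact absurd hp (pvPieces_ne_nil rest)
        | cons y t =>
          simp [pvPieces_cons_dot, hp, List.modifyHead]
      · have hpre : List.isPrefixOf ['.'] (c :: rest) = false := by
          simp [List.isPrefixOf]
          exact fun hh => absurd hh.symm hc
        rw [if_neg (by simp [hpre])]
        simp only [List.length_cons] at h
        rw [ih rest (c :: cur) [] acc' (by omega)]
        cases hp : pvPieces rest with
        | nil => exact absurd hp (pvPieces_ne_nil rest)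
        | cons y t =>
          simp [pvPieces_cons_ne c rest hc, hp, List.modifyHead]

theorem pv_splitOn_eq (cs : List Char) : PySem.Chars.splitOn cs ['.'] = pvPieces cs := by
  have := pv_go_eq (cs.length + 1) cs [] [] [] (by omega)
  simp only [PySem.Chars.splitOn]
  rw [this]
  cases hp : pvPieces cs with
  | nil => exact absurd hp (pvPieces_ne_nil cs)
  | cons y t => simp [List.modifyHead]

theorem pv_dot_suffix_append {x j t : List Char} (hx : '.' ∉ x) :
    ('.' :: t) <:+ (x ++ '.' :: j) ↔ (t = j ∨ ('.' :: t) <:+ j) := by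
  constructor
  · rintro ⟨p, hp⟩
    rcases List.append_eq_append_iff.mp hp with ⟨w, hw1, hw2⟩ | ⟨w, hw1, hw2⟩
    · cases w with
      | nil =>
        simp only [List.nil_append, List.cons.injEq] at hw2
        exact Or.inl hw2.2
      | cons d w' =>
        exfalso
        rw [List.cons_append] at hw2
        injection hw2 with h1 _
        apply hx
        rw [hw1, ← h1]
        simp
    · cases w with
      | nil =>
        simp only [List.nil_append, List.cons.injEq] at hw2
        exact Or.inl hw2.2.symm
      | cons d w' =>
        rw [List.cons_append] at hw2
        injection hw2 with _ h2
        exact Or.inr ⟨w', h2.symm⟩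
  · rintro (rfl | ⟨p, hp⟩)
    · exact ⟨x, rfl⟩
    · exact ⟨x ++ '.' :: p, by simp [← hp]⟩

theorem pv_key : ∀ (L : List (List Char)), L ≠ [] → (∀ x ∈ L, '.' ∉ x) → ∀ (t : List Char),
    ((PySem.Chars.join ['.'] L = t ∨ ('.' :: t) <:+ PySem.Chars.join ['.'] L) ↔
      ∃ k < L.length, PySem.Chars.join ['.'] (L.drop k) = t) := by
  intro L
  induction L with
  | nil => intro hne; exact absurd rfl hne
  | cons x M ih =>
    intro _ hdf t
    cases M with
    | nil =>
      simp only [PySem.Chars.join_singleton]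
      constructor
      · rintro (rfl | ⟨p, hp⟩)
        · exact ⟨0, by simp, by simp [PySem.Chars.join_singleton]⟩
        · exfalso
          exact hdf x (by simp) (by rw [← hp]; simp)
      · rintro ⟨k, hk, hjk⟩
        left
        have hk0 : k = 0 := by simp at hk; omega
        subst hk0
        simpa [PySem.Chars.join_singleton] using hjk
    | cons y M' =>
      have hdfx : '.' ∉ x := hdf x (by simp)
      have hdfM : ∀ z ∈ y :: M', '.' ∉ z := fun z hz => hdf z (by simp [List.mem_cons] at hz ⊢; tauto)
      have ihM := ih (by simp) hdfM t
      rw [PySem.Chars.join_cons_cons]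
      have harr : x ++ ['.'] ++ PySem.Chars.join ['.'] (y :: M') =
          x ++ '.' :: PySem.Chars.join ['.'] (y :: M') := by simp
      rw [harr, pv_dot_suffix_append hdfx]
      constructor
      · rintro (h0 | (rfl | hsuf))
        · exact ⟨0, by simp, by rw [List.drop_zero, PySem.Chars.join_cons_cons]; simpa using h0⟩
        · obtain ⟨k, hk, hjk⟩ := ihM.mp (Or.inl rfl)
          exact ⟨k + 1, by simpa using hk, by simpa using hjk⟩
        · obtain ⟨k, hk, hjk⟩ := ihM.mp (Or.inr hsuf)
          exact ⟨k + 1, by simpa using hk, by simpa using hjk⟩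
      · rintro ⟨k, hk, hjk⟩
        cases k with
        | zero =>
          left
          rw [List.drop_zero, PySem.Chars.join_cons_cons] at hjk
          simpa using hjk
        | succ k =>
          have := ihM.mpr ⟨k, by simpa using hk, by simpa using hjk⟩
          rcases this with h1 | h2
          · exact Or.inr (Or.inl h1.symm)
          · exact Or.inr (Or.inr h2)

theorem pv_cond_eq (h : List Char) :
    pvSuffixes.any (fun suffix => pvSuffixMatches h suffix) =
      (PySem.List.pyRange 0 (pvPieces h).length 1).any (fun i =>
        pvSuffixes.contains (PySem.Chars.join ['.'] (PySem.List.slice (pvPieces h) (some i) none))) := by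
  rw [Bool.eq_iff_iff, List.any_eq_true, List.any_eq_true]
  constructor
  · rintro ⟨s, hs, hmatch⟩
    simp only [pvSuffixMatches, Bool.or_eq_true, beq_iff_eq, PySem.Chars.endswith_iff] at hmatch
    rw [← pvPieces_join h] at hmatch
    obtain ⟨k, hk, hjk⟩ :=
      (pv_key (pvPieces h) (pvPieces_ne_nil h) (pvPieces_dotfree h) s).mp hmatch
    refine ⟨(k : Int), ?_, ?_⟩
    · rw [PySem.List.mem_pyRange_one]
      constructor
      · exact Int.natCast_nonneg k
      · exact_mod_cast hk
    · rw [PySem.List.slice_from_natCast, hjk]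
      simpa using hs
  · rintro ⟨i, hi, hin⟩
    rw [PySem.List.mem_pyRange_one] at hi
    obtain ⟨hi0, hin'⟩ := hi
    have hik : i = ((i.toNat : Nat) : Int) := (Int.toNat_of_nonneg hi0).symm
    rw [hik, PySem.List.slice_from_natCast] at hin
    have hk : i.toNat < (pvPieces h).length := by omega
    simp only [List.contains_iff_mem] at hin
    have hkey := (pv_key (pvPieces h) (pvPieces_ne_nil h) (pvPieces_dotfree h)
      (PySem.Chars.join ['.'] ((pvPieces h).drop i.toNat))).mpr ⟨i.toNat, hk, rfl⟩
    refine ⟨PySem.Chars.join ['.'] ((pvPieces h).drop i.toNat), hin, ?_⟩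
    simp only [pvSuffixMatches, Bool.or_eq_true, beq_iff_eq, PySem.Chars.endswith_iff]
    rw [pvPieces_join h] at hkey
    exact hkey

-- ===== VERDICT (by name: the statement is the Claim_ definition above) =====
theorem is_noise_nameserver_spec : Claim_equal_is_noise_nameserver := by
  intro ns _
  unfold Spec_is_noise_nameserver
  simp only [is_noise_nameserver, is_noise_nameserver_alt]
  by_cases hne : pvNormalize ns = []
  · simp [hne]
  · rw [if_neg hne, if_neg hne, pv_splitOn_eq, pv_cond_eq]
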